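-- pv_equiv track=rewrite | github.com/spineight/algorithmsAndDataStructures | ITMO/KT/practice/hazzus/ml-master/cf/N-dist.py | in_dist
-- ===== SOURCE A (Python) =====
-- def in_dist(data):
-- 	distance = 0
-- 	data_by_c = {}
-- 	for x, c in data:
-- 		if c not in data_by_c:
-- 			data_by_c[c] = []
-- 		data_by_c[c].append(x)
-- 	for c in data_by_c:
-- 		x = data_by_c[c]
-- 		x.sort()
--
-- 		suffix = sum(x)
-- 		prefix = 0
-- 		for i in range(len(x)):
-- 			suffix -= x[i]
--
-- 			distance += (x[i] * i - prefix) + (suffix - x[i] * (len(x) - i - 1))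
--
-- 			prefix += x[i]
-- 	return distance
-- ===== SOURCE B (Python) =====
-- def in_dist(data):
--     groups = {}
--     for x, c in data:
--         groups.setdefault(c, []).append(x)
--     return sum(abs(a - b) for xs in groups.values() for a in xs for b in xs)
-- ===== Notes on version B (the rewrite author's own statement) =====
-- stated objective: simpler
-- what changed: Replaces A's sort plus prefix/suffix running-sum sweep per class by a direct naive sum of |a-b| over all ordered pairs within each class (no sort, no index arithmetic).
import Mathlib
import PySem

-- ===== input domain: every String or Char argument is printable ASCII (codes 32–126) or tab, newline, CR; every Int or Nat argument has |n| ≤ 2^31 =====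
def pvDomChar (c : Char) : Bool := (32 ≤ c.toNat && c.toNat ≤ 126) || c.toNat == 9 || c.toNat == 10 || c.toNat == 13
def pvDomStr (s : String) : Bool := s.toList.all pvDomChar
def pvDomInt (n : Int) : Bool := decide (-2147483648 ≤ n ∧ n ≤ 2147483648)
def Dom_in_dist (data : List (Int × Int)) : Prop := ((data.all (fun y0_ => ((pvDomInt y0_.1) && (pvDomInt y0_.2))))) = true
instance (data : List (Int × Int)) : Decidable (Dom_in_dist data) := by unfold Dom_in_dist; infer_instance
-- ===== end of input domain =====

-- B replaces A's sort + prefix/suffix sweep per class by a direct all-ordered-pairs |a-b| sum (simpler; same results, not faster).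

-- ===== PORT A =====
-- Python A's inner 'for i in range(len(x)):' loop: indices are consumed in order and x[i]
-- is always in range, so it is ported exactly as structural recursion over x carrying i.
def pvALoop (n : Int) : List Int → Int → Int → Int → Int → Int
  | [], _i, _pre, _suf, dist => dist
  | v :: rest, i, pre, suf, dist =>
      pvALoop n rest (i + 1) (pre + v) (suf - v)
        (dist + ((v * i - pre) + ((suf - v) - v * (n - i - 1))))

def in_dist (data : List (Int × Int)) : Int :=
  let data_by_c := data.foldl
    (fun d p =>
      let d := if d.contains p.2 then d else d.insert p.2 []   -- if c not in data_by_c: data_by_c[c] = []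
      d.modify p.2 [] (· ++ [p.1]))                            -- data_by_c[c].append(x)
    PySem.Dict.empty
  data_by_c.keys.foldl
    (fun distance c =>
      let x := PySem.List.sorted (data_by_c.getD c []) (fun v => v) false
      pvALoop (x.length : Int) x 0 0 x.sum distance)
    0

-- ===== PORT B =====
def in_dist_alt (data : List (Int × Int)) : Int :=
  let groups := data.foldl
    (fun d p => (d.setdefault p.2 []).modify p.2 [] (· ++ [p.1]))  -- groups.setdefault(c, []).append(x)
    PySem.Dict.empty
  ((groups.values).map (fun xs => (xs.map (fun a => (xs.map (fun b => |a - b|)).sum)).sum)).sum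

-- ===== PRECONDITION & SPEC =====
def Spec_in_dist (data : List (Int × Int)) (out : Int) : Prop := out = in_dist_alt data
instance (data : List (Int × Int)) (out : Int) : Decidable (Spec_in_dist data out) := by unfold Spec_in_dist; infer_instance

-- ===== CLAIM (what is proved, stated in full; the proofs are below) =====
def Claim_equal_in_dist : Prop := ∀ (data : List (Int × Int)), Dom_in_dist data → Spec_in_dist data (in_dist data)

-- ===== LEMMAS AND PROOFS =====

-- both grouping loops build the same dict as a plain 'modify' fold
def pvGroups (data : List (Int × Int)) : PySem.Dict Int (List Int) :=
  data.foldl (fun d p => d.modify p.2 [] (· ++ [p.1])) PySem.Dict.empty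

theorem pvStepA_eq (d : PySem.Dict Int (List Int)) (p : Int × Int) :
    ((if d.contains p.2 then d else d.insert p.2 []).modify p.2 [] (· ++ [p.1]))
      = d.modify p.2 [] (· ++ [p.1]) := by
  by_cases h : d.contains p.2
  · simp [h]
  · simp only [Bool.not_eq_true] at h
    simp only [h]
    simp [PySem.Dict.modify, PySem.Dict.getD_insert_self, PySem.Dict.insert_insert_self,
      PySem.Dict.getD_of_not_contains d [] h]

theorem pvStepB_eq (d : PySem.Dict Int (List Int)) (p : Int × Int) :
    ((d.setdefault p.2 []).modify p.2 [] (· ++ [p.1])) = d.modify p.2 [] (· ++ [p.1]) := by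
  by_cases h : d.contains p.2
  · rw [PySem.Dict.setdefault_of_contains d [] h]
  · simp only [Bool.not_eq_true] at h
    rw [PySem.Dict.setdefault_of_not_contains d [] h]
    simp [PySem.Dict.modify, PySem.Dict.getD_insert_self, PySem.Dict.insert_insert_self,
      PySem.Dict.getD_of_not_contains d [] h]

-- Σ_{b∈l} (v - b) = v·|l| - Σ l   (and the mirrored form)
theorem pvSumSub (l : List Int) (v : Int) :
    (l.map (fun b => v - b)).sum = v * l.length - l.sum := by
  induction l with
  | nil => simp
  | cons a t ih => simp [ih]; ring

theorem pvSumSub' (l : List Int) (v : Int) :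
    (l.map (fun b => b - v)).sum = l.sum - v * l.length := by
  induction l with
  | nil => simp
  | cons a t ih => simp [ih]; ring

theorem pvAbsLeft (l : List Int) (v : Int) (h : ∀ b ∈ l, b ≤ v) :
    (l.map (fun b => |v - b|)).sum = v * l.length - l.sum := by
  rw [← pvSumSub]
  congr 1
  exact List.map_congr_left (fun b hb => abs_of_nonneg (by have := h b hb; omega))

theorem pvAbsRight (l : List Int) (v : Int) (h : ∀ b ∈ l, v ≤ b) :
    (l.map (fun b => |v - b|)).sum = l.sum - v * l.length := by
  rw [← pvSumSub' l v]
  congr 1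
  exact List.map_congr_left (fun b hb => by
    have := h b hb; rw [abs_of_nonpos (by omega)]; ring)

-- the invariant of A's prefix/suffix sweep over a sorted list
theorem pvALoop_eq : ∀ (rem left : List Int) (dist n i pre suf : Int),
    n = left.length + rem.length → i = left.length → pre = left.sum → suf = rem.sum →
    (left ++ rem).Pairwise (· ≤ ·) →
    pvALoop n rem i pre suf dist
      = dist + (rem.map (fun a => ((left ++ rem).map (fun b => |a - b|)).sum)).sum := by
  intro rem
  induction rem with
  | nil => intro left dist n i pre suf _ _ _ _ _; simp [pvALoop]
  | cons v rest ih =>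
      intro left dist n i pre suf hn hi hpre hsuf h
      have hL : ∀ b ∈ left, b ≤ v := fun b hb =>
        (List.pairwise_append.mp h).2.2 b hb v (List.mem_cons_self)
      have hR : ∀ b ∈ rest, v ≤ b :=
        (List.pairwise_cons.mp (List.pairwise_append.mp h).2.1).1
      have h' : ((left ++ [v]) ++ rest).Pairwise (· ≤ ·) := by
        rw [List.append_assoc]; simpa using h
      rw [pvALoop]
      rw [ih (left ++ [v]) _ n (i + 1) (pre + v) (suf - v)
        (by simp at hn ⊢; omega)
        (by simp; omega)
        (by simp [hpre])
        (by simp at hsuf; omega)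
        h']
      have hv : ((left ++ v :: rest).map (fun b => |v - b|)).sum
          = (v * left.length - left.sum) + (rest.sum - v * rest.length) := by
        rw [show left ++ v :: rest = left ++ ([v] ++ rest) by simp, ← List.append_assoc]
        simp only [List.map_append, List.sum_append]
        rw [pvAbsLeft left v hL, pvAbsRight rest v hR]
        simp only [List.map_cons, List.sum_cons, sub_self, abs_zero, List.map_nil, List.sum_nil]
        ring
      have hassoc : (left ++ [v]) ++ rest = left ++ v :: rest := by simp
      rw [hassoc]
      simp only [List.map_cons, List.sum_cons]
      rw [hv]
      have hlen : n = (left.length : Int) + rest.length + 1 := by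
        simp at hn; omega
      have hsuf' : suf = v + rest.sum := by simp at hsuf; omega
      subst hi hpre hlen hsuf'
      ring

-- per-class: A's sweep over the sorted class list = B's all-pairs sum over the original list
theorem pvClass_eq (xs : List Int) (dist : Int) :
    (let x := PySem.List.sorted xs (fun v => v) false
     pvALoop (x.length : Int) x 0 0 x.sum dist)
      = dist + (xs.map (fun a => (xs.map (fun b => |a - b|)).sum)).sum := by
  have hp : (PySem.List.sorted xs (fun v => v) false).Perm xs := PySem.List.sorted_perm xs _ false
  have hs : (PySem.List.sorted xs (fun v => v) false).Pairwise (· ≤ ·) := by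
    have := PySem.List.sorted_pairwise (xs := xs) (key := fun v : Int => v)
    simpa using this
  set s := PySem.List.sorted xs (fun v => v) false with hsdef
  have h0 := pvALoop_eq s [] dist (s.length : Int) 0 0 s.sum
    (by simp) (by simp) (by simp) rfl (by simpa using hs)
  simp only [List.nil_append] at h0
  show pvALoop (s.length : Int) s 0 0 s.sum dist = _
  rw [h0]
  congr 1
  have hinner : ∀ a : Int, (s.map (fun b => |a - b|)).sum = (xs.map (fun b => |a - b|)).sum :=
    fun a => (hp.map (fun b => |a - b|)).sum_eq
  calc (s.map (fun a => (s.map (fun b => |a - b|)).sum)).sum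
      = (s.map (fun a => (xs.map (fun b => |a - b|)).sum)).sum := by
        congr 1; exact List.map_congr_left (fun a _ => hinner a)
    _ = (xs.map (fun a => (xs.map (fun b => |a - b|)).sum)).sum :=
        (hp.map _).sum_eq

-- ===== VERDICT (by name: the statement is the Claim_ definition above) =====
theorem in_dist_spec : Claim_equal_in_dist := by
  intro data _
  unfold Spec_in_dist in_dist in_dist_alt
  have hA : (data.foldl
      (fun d p =>
        let d := if d.contains p.2 then d else d.insert p.2 []
        d.modify p.2 [] (· ++ [p.1])) PySem.Dict.empty) = pvGroups data :=
    PySem.List.foldl_congr_mem data _ _ _ (fun d p _ => pvStepA_eq d p)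
  have hB : (data.foldl
      (fun d p => (d.setdefault p.2 []).modify p.2 [] (· ++ [p.1])) PySem.Dict.empty)
        = pvGroups data :=
    PySem.List.foldl_congr_mem data _ _ _ (fun d p _ => pvStepB_eq d p)
  simp only [hA, hB]
  have hnd : (pvGroups data).keys.Nodup := by
    unfold pvGroups
    exact PySem.Dict.nodup_keys_foldl_modify_key data (fun p => p.2) []
      (fun _ p v => v ++ [p.1]) PySem.Dict.empty (by simp)
  rw [PySem.Dict.values_eq_map_keys (pvGroups data) hnd []]
  rw [PySem.List.foldl_congr_mem (pvGroups data).keys _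
    (fun (distance : Int) (c : Int) => distance
      + (((pvGroups data).getD c []).map
           (fun a => (((pvGroups data).getD c []).map (fun b => |a - b|)).sum)).sum)
    0
    (fun dist c _ => pvClass_eq ((pvGroups data).getD c []) dist)]
  rw [PySem.List.foldl_add]
  simp only [List.map_map, Function.comp_def, zero_add]
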